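-- pv_equiv track=rewrite | github.com/Monnoroch/images-markup | main.py | all_files_after
-- ===== SOURCE A (Python) =====
-- def all_files_after(files, after_file):
--     skip = after_file is not None
--     for file in files:
--         if skip:
--             if file == after_file:
--                 skip = False
--             continue
--         yield file
-- ===== SOURCE B (Python) =====
-- def all_files_after(files, after_file):
--     if after_file is None:
--         start = 0
--     else:
--         try:
--             start = files.index(after_file) + 1
--         except ValueError:
--             start = len(files)
--     yield from files[start:]
-- ===== Notes on version B (the rewrite author's own statement) =====
-- stated objective: alternative
-- what changed: Instead of scanning with a skip flag, B computes the numeric start position once (list.index of the marker plus one, list length if absent, 0 for None) and yields a single slice files[start:].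
import Mathlib
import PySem

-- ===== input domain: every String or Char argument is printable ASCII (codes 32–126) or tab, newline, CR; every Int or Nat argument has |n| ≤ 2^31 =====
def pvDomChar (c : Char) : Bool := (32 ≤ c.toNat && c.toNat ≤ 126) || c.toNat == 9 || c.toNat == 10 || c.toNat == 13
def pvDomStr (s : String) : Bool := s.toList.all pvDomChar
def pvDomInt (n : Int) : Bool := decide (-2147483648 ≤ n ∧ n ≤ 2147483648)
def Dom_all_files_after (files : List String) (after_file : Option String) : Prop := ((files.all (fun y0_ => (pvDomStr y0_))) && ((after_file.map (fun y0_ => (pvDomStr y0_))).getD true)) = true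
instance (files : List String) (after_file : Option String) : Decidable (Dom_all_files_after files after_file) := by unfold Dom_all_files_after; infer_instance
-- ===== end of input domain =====

-- B replaces A's skip-flag scan by computing a numeric start index (list.index + 1, or the length when absent, 0 for None) and returning the single slice files[start:]; alternative, same cost.

-- ===== PORT A =====
-- A's loop over `files` carrying the mutable flag `skip`; yields collected in order.
def all_files_after_loopA (after_file : Option String) : Bool → List String → List String
  | _, [] => []
  | skip, f :: rest =>
    if skip then
      if some f == after_file then all_files_after_loopA after_file false rest
      else all_files_after_loopA after_file true rest
    else f :: all_files_after_loopA after_file false rest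

def all_files_after (files : List String) (after_file : Option String) : List String :=
  all_files_after_loopA after_file after_file.isSome files

-- ===== PORT B =====
-- B: start = 0 (None) / files.index(marker)+1 / len(files) (ValueError branch); result = files[start:]
def all_files_after_alt (files : List String) (after_file : Option String) : List String :=
  let start : Int :=
    match after_file with
    | none => 0
    | some m =>
      match PySem.List.index? files m with
      | some i => (i : Int) + 1
      | none => (files.length : Int)
  PySem.List.slice files (some start) none

-- ===== PRECONDITION & SPEC =====
def Spec_all_files_after (files : List String) (after_file : Option String) (out : List String) : Prop := out = all_files_after_alt files after_file
instance (files : List String) (after_file : Option String) (out : List String) : Decidable (Spec_all_files_after files after_file out) := by unfold Spec_all_files_after; infer_instance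

-- ===== CLAIM (what is proved, stated in full; the proofs are below) =====
def Claim_equal_all_files_after : Prop := ∀ (files : List String) (after_file : Option String), Dom_all_files_after files after_file → Spec_all_files_after files after_file (all_files_after files after_file)

-- ===== LEMMAS AND PROOFS =====

-- With skip = false the flag never flips back: A yields every remaining file.
theorem all_files_after_loopA_false (after_file : Option String) (l : List String) :
    all_files_after_loopA after_file false l = l := by
  induction l with
  | nil => rfl
  | cons f rest ih => simp [all_files_after_loopA, ih]

-- With skip = true and marker m, A's loop drops through the first occurrence of m (everything if absent).
theorem all_files_after_loopA_true (m : String) (l : List String) :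
    all_files_after_loopA (some m) true l =
      match List.idxOf? m l with
      | some i => l.drop (i + 1)
      | none => [] := by
  induction l with
  | nil => rfl
  | cons f rest ih =>
    rw [List.idxOf?_cons]
    by_cases h : f = m
    · subst h
      simp [all_files_after_loopA, all_files_after_loopA_false]
    · cases hi : List.idxOf? m rest with
      | none => simp [all_files_after_loopA, h, ih, hi]
      | some i => simp [all_files_after_loopA, h, ih, hi]

-- ===== VERDICT (by name: the statement is the Claim_ definition above) =====
theorem all_files_after_spec : Claim_equal_all_files_after := by
  intro files after_file _
  unfold Spec_all_files_after all_files_after all_files_after_alt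
  cases after_file with
  | none =>
    have h0 : PySem.List.slice files (some ((0 : Nat) : Int)) none = files.drop 0 :=
      PySem.List.slice_from_natCast files 0
    simp only [List.drop_zero, Nat.cast_zero] at h0
    simp [all_files_after_loopA_false, h0]
  | some m =>
    simp only [Option.isSome_some, PySem.List.index?_eq_idxOf?, all_files_after_loopA_true]
    cases hi : List.idxOf? m files with
    | none =>
      show ([] : List String) = PySem.List.slice files (some ((files.length : Nat) : Int)) none
      rw [PySem.List.slice_from_natCast, List.drop_length]
    | some i =>
      have hcast : ((i : Int) + 1) = ((i + 1 : Nat) : Int) := by push_cast; ring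
      show List.drop (i + 1) files = PySem.List.slice files (some ((i : Int) + 1)) none
      rw [hcast, PySem.List.slice_from_natCast]
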